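-- pv_equiv track=rewrite | github.com/niebzz/advent-of-code | 2015/day 3/2015_3.py | deliver_presents
-- ===== SOURCE A (Python) =====
-- def get_coordinate(char: str, row: int, col: int):
--     match char:
--         case ">":
--             return (row, col + 1)
--         case "<":
--             return (row, col - 1)
--         case "^":
--             return (row - 1, col)
--         case "v":
--             return (row + 1, col)
--
--     return KeyError("Invalid character.")
--
-- def deliver_presents(data: str):
--     r, c = 0, 0
--     locations = {(r, c): 1}
--
--     for char in data:
--         (r, c) = get_coordinate(char, r, c)
--
--         if (r, c) not in locations:
--             locations[(r, c)] = 1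
--         else:
--             locations[(r, c)] += 1
--     return locations
-- ===== SOURCE B (Python) =====
-- def _delta(char: str):
--     if char == ">":
--         return (0, 1)
--     if char == "<":
--         return (0, -1)
--     if char == "^":
--         return (-1, 0)
--     if char == "v":
--         return (1, 0)
--     raise KeyError("Invalid character.")
--
--
-- def _solve(data: str):
--     # Divide and conquer: returns (visit counts of the positions reached after
--     # each move, relative to the segment's start; the segment's displacement).
--     n = len(data)
--     if n == 0:
--         return {}, (0, 0)
--     if n == 1:
--         d = _delta(data)
--         return {d: 1}, d
--     left, (lr, lc) = _solve(data[: n // 2])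
--     right, (rr, rc) = _solve(data[n // 2:])
--     for pos, cnt in right.items():
--         q = (lr + pos[0], lc + pos[1])
--         left[q] = left.get(q, 0) + cnt
--     return left, (lr + rr, lc + rc)
--
--
-- def deliver_presents(data: str):
--     sub, _ = _solve(data)
--     locations = {(0, 0): 1}
--     for pos, cnt in sub.items():
--         locations[pos] = locations.get(pos, 0) + cnt
--     return locations
-- ===== Notes on version B (the rewrite author's own statement) =====
-- stated objective: alternative
-- what changed: B replaces A's single left-to-right walk with conditional dict updates by a divide-and-conquer: it recursively computes each half's visit-count dict relative to that half's start plus its displacement, then shifts the right half's dict by the left half's displacement and merges grouped counts, finally merging the origin in; correct because visit counts are translation-equivariant and dict first-insertion order is preserved by the merge.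
import Mathlib
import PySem

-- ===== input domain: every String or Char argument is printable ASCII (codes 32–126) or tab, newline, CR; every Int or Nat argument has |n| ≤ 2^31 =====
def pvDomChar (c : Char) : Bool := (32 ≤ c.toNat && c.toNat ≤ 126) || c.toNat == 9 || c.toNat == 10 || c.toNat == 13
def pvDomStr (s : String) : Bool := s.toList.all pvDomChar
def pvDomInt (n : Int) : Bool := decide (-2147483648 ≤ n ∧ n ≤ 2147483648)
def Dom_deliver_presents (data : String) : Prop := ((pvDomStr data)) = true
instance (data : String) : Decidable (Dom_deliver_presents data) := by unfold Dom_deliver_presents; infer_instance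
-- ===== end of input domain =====

-- B replaces A's single walk-and-tally loop by divide-and-conquer: each half's visit counts
-- are computed relative to its own start, the right half's dict is shifted by the left
-- half's displacement and the grouped counts merged (objective: alternative).
-- The dict result is flattened to (row, col, count) triples in insertion order.

-- ===== PORT A =====
-- get_coordinate: on other chars Python returns a KeyError OBJECT, whose tuple-unpacking
-- in the caller then raises TypeError; ported as Option, none = that raise (excluded by Pre_).
def get_coordinate (char : Char) (row col : Int) : Option (Int × Int) :=
  if char = '>' then some (row, col + 1)
  else if char = '<' then some (row, col - 1)
  else if char = '^' then some (row - 1, col)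
  else if char = 'v' then some (row + 1, col)
  else none

-- the 'for char in data' loop, state (r, c, locations); on none the Python raises
-- (unreachable under Pre_), the port keeps the dict unchanged there.
def pvALoop : List Char → Int → Int → PySem.Dict (Int × Int) Int → PySem.Dict (Int × Int) Int
  | [], _, _, locations => locations
  | ch :: rest, r, c, locations =>
    match get_coordinate ch r c with
    | none => locations
    | some (r', c') =>
      let locations' :=
        if locations.contains (r', c') = false then locations.insert (r', c') 1
        else locations.insert (r', c') (locations.getD (r', c') 0 + 1)
      pvALoop rest r' c' locations'

def deliver_presents (data : String) : List (Int × Int × Int) :=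
  (pvALoop data.toList 0 0 (PySem.Dict.empty.insert (0, 0) 1)).items.map
    (fun p => (p.1.1, p.1.2, p.2))

-- ===== PORT B =====
-- _delta: on other chars Python raises KeyError (excluded by Pre_); ported as Option.
def pvDelta (char : Char) : Option (Int × Int) :=
  if char = '>' then some (0, 1)
  else if char = '<' then some (0, -1)
  else if char = '^' then some (-1, 0)
  else if char = 'v' then some (1, 0)
  else none

-- _solve: divide and conquer; returns (visit counts of positions reached after each move,
-- relative to the segment's start; the segment's displacement). On the raising branch
-- (none, excluded by Pre_) the port returns the empty state.
def pvSolve : List Char → (PySem.Dict (Int × Int) Int) × (Int × Int)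
  | [] => (PySem.Dict.empty, (0, 0))
  | [c] =>
    match pvDelta c with
    | some d => (PySem.Dict.empty.insert d 1, d)
    | none => (PySem.Dict.empty, (0, 0))
  | c1 :: c2 :: rest =>
    let cs := c1 :: c2 :: rest
    let n := cs.length
    let lres := pvSolve (cs.take (n / 2))
    let rres := pvSolve (cs.drop (n / 2))
    let pl := lres.2
    let merged := rres.1.items.foldl
      (fun d x => d.insert (pl.1 + x.1.1, pl.2 + x.1.2) (d.getD (pl.1 + x.1.1, pl.2 + x.1.2) 0 + x.2))
      lres.1
    (merged, (pl.1 + rres.2.1, pl.2 + rres.2.2))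
  termination_by cs => cs.length
  decreasing_by
    · simp [List.length_take]; omega
    · simp [List.length_drop]; omega

def deliver_presents_alt (data : String) : List (Int × Int × Int) :=
  let sub := (pvSolve data.toList).1
  let locations := sub.items.foldl
    (fun d x => d.insert x.1 (d.getD x.1 0 + x.2))
    (PySem.Dict.empty.insert (0, 0) 1)
  locations.items.map (fun p => (p.1.1, p.1.2, p.2))

-- ===== PRECONDITION & SPEC =====
-- Pre_ excludes strings containing a character that is not one of the four move characters:
-- there A raises TypeError (unpacking the KeyError object) and B raises KeyError.
def Pre_deliver_presents (data : String) : Prop :=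
  data.toList.all (fun ch => ch = '>' || ch = '<' || ch = '^' || ch = 'v') = true
instance (data : String) : Decidable (Pre_deliver_presents data) := by
  unfold Pre_deliver_presents; infer_instance

def pvWitness_deliver_presents : String := ">>vv<<^^>"

def Spec_deliver_presents (data : String) (out : List (Int × Int × Int)) : Prop := out = deliver_presents_alt data
instance (data : String) (out : List (Int × Int × Int)) : Decidable (Spec_deliver_presents data out) := by unfold Spec_deliver_presents; infer_instance

-- ===== CLAIM (what is proved, stated in full; the proofs are below) =====
def Claim_equal_deliver_presents : Prop := ∀ (data : String), Dom_deliver_presents data → Pre_deliver_presents data → Spec_deliver_presents data (deliver_presents data)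

-- ===== LEMMAS AND PROOFS =====

def pvValid (cs : List Char) : Bool :=
  cs.all (fun ch => ch = '>' || ch = '<' || ch = '^' || ch = 'v')

-- absolute path of positions
def pvAbs : List Char → Int → Int → List (Int × Int)
  | [], _, _ => []
  | ch :: rest, r, c =>
    match pvDelta ch with
    | some d => (r + d.1, c + d.2) :: pvAbs rest (r + d.1) (c + d.2)
    | none => []

-- total displacement (proof-only)
def pvEnd : List Char → Int × Int
  | [] => (0, 0)
  | ch :: rest =>
    match pvDelta ch with
    | some d => ((pvEnd rest).1 + d.1, (pvEnd rest).2 + d.2)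
    | none => (0, 0)

lemma pvDelta_isSome {ch : Char} (h : (ch = '>' || ch = '<' || ch = '^' || ch = 'v') = true) :
    ∃ d, pvDelta ch = some d := by
  simp only [Bool.or_eq_true, decide_eq_true_eq] at h
  rcases h with ((h | h) | h) | h <;> subst h <;> exact ⟨_, rfl⟩

lemma pvAbs_shift (cs : List Char) (a b : Int) (h : pvValid cs = true) :
    pvAbs cs a b = (pvAbs cs 0 0).map (fun q => (a + q.1, b + q.2)) := by
  induction cs generalizing a b with
  | nil => rfl
  | cons ch rest ih =>
    simp only [pvValid, List.all_cons, Bool.and_eq_true] at h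
    obtain ⟨d, hd⟩ := pvDelta_isSome h.1
    have hv : pvValid rest = true := h.2
    simp only [pvAbs, hd, zero_add]
    rw [ih _ _ hv, ih d.1 d.2 hv]
    simp only [List.map_cons, List.map_map]
    congr 1
    apply List.map_congr_left
    intro q _
    simp only [Function.comp_apply, Prod.mk.injEq]
    constructor <;> ring

lemma pvAbs_append (l r : List Char) (a b : Int) (h : pvValid l = true) :
    pvAbs (l ++ r) a b = pvAbs l a b ++ pvAbs r (a + (pvEnd l).1) (b + (pvEnd l).2) := by
  induction l generalizing a b with
  | nil => simp [pvAbs, pvEnd]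
  | cons ch rest ih =>
    simp only [pvValid, List.all_cons, Bool.and_eq_true] at h
    obtain ⟨d, hd⟩ := pvDelta_isSome h.1
    simp only [List.cons_append, pvAbs, hd, pvEnd]
    rw [ih _ _ h.2]
    have h1 : a + d.1 + (pvEnd rest).1 = a + ((pvEnd rest).1 + d.1) := by ring
    have h2 : b + d.2 + (pvEnd rest).2 = b + ((pvEnd rest).2 + d.2) := by ring
    rw [h1, h2]

lemma pvEnd_append (l r : List Char) (h : pvValid l = true) :
    pvEnd (l ++ r) = ((pvEnd l).1 + (pvEnd r).1, (pvEnd l).2 + (pvEnd r).2) := by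
  induction l with
  | nil => simp [pvEnd]
  | cons ch rest ih =>
    simp only [pvValid, List.all_cons, Bool.and_eq_true] at h
    obtain ⟨d, hd⟩ := pvDelta_isSome h.1
    simp only [List.cons_append, pvEnd, hd]
    rw [ih h.2]
    simp only [Prod.mk.injEq]
    constructor <;> ring

-- L1: getD of the grouped-bump fold
lemma pvGetD_bumpFold (kf : (Int × Int) → (Int × Int)) (L : List ((Int × Int) × Int))
    (d : PySem.Dict (Int × Int) Int) (k : Int × Int) :
    (L.foldl (fun d x => d.insert (kf x.1) (d.getD (kf x.1) 0 + x.2)) d).getD k 0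
      = d.getD k 0 + ((L.filter (fun x => kf x.1 == k)).map (·.2)).sum := by
  induction L generalizing d with
  | nil => simp
  | cons p rest ih =>
    rw [List.foldl_cons, ih]
    by_cases hk : kf p.1 = k
    · simp [hk]
      ring
    · simp [hk, PySem.Dict.getD_insert, Ne.symm hk]

-- L2
lemma pvOfList_map_inj (kf : (Int × Int) → (Int × Int)) (hinj : Function.Injective kf)
    (m : List (Int × Int)) :
    PySem.Set.ofList (m.map kf) = (PySem.Set.ofList m).map kf := by
  induction m using List.reverseRecOn with
  | nil => rfl
  | append_singleton m x ih =>
    rw [List.map_append, List.map_singleton, PySem.Set.ofList_append_singleton,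
      PySem.Set.ofList_append_singleton, ih, PySem.Set.add_eq_ite, PySem.Set.add_eq_ite]
    by_cases hx : x ∈ PySem.Set.ofList m
    · have : kf x ∈ (PySem.Set.ofList m).map kf := List.mem_map_of_mem hx
      simp [hx, this]
    · have : kf x ∉ (PySem.Set.ofList m).map kf := by
        simp only [List.mem_map, hinj.eq_iff]
        rintro ⟨u, hu, rfl⟩
        exact hx hu
      simp [hx, this]

-- L3
lemma pvUpdate_ofList (s : PySem.Set (Int × Int)) (l : List (Int × Int)) :
    s.update (PySem.Set.ofList l) = s.update l := by
  rw [PySem.Set.update_eq_append_filter, PySem.Set.update_eq_append_filter,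
    PySem.Set.ofList_ofList]

-- L4
lemma pvSum_filter_count (kf : (Int × Int) → (Int × Int)) (hinj : Function.Injective kf)
    (m : List (Int × Int)) (k : Int × Int) :
    ((((PySem.Dict.counter m).items).filter (fun x => kf x.1 == k)).map (·.2)).sum
      = ((m.map kf).count k : Int) := by
  rw [PySem.Dict.items_counter]
  rw [List.filter_map]
  by_cases hex : ∃ u ∈ PySem.Set.ofList m, kf u = k
  · obtain ⟨u, hu, hku⟩ := hex
    have hpred : ∀ q ∈ PySem.Set.ofList m,
        ((fun x => kf x.1 == k) ∘ fun k => (k, (List.count k m : Int))) q = (q == u) := by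
      intro q _
      simp only [Function.comp_apply, ← hku]
      by_cases hqu : q = u
      · subst hqu; simp
      · have hk : kf q ≠ kf u := fun hc => hqu (hinj hc)
        simp [hqu, hk]
    rw [List.filter_congr hpred, List.filter_beq,
      List.count_eq_one_of_mem (PySem.Set.nodup_ofList m) hu]
    have : k = kf u := hku.symm
    subst this
    rw [List.count_map_of_injective _ _ hinj]
    simp
  · rw [not_exists] at hex
    simp only [not_and] at hex
    have hnil : (PySem.Set.ofList m).filter
        ((fun x => kf x.1 == k) ∘ fun k => (k, (List.count k m : Int))) = [] := by
      rw [List.filter_eq_nil_iff]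
      intro q hq
      simp only [Function.comp_apply, beq_iff_eq]
      exact hex q hq
    rw [hnil]
    have : k ∉ m.map kf := by
      rw [List.mem_map]
      rintro ⟨u, hu, hku⟩
      exact hex u ((PySem.Set.mem_ofList m u).mpr hu) hku
    rw [List.count_eq_zero_of_not_mem this]
    simp

-- master merge lemma
lemma pvMerge_counter (kf : (Int × Int) → (Int × Int)) (hinj : Function.Injective kf)
    (m a : List (Int × Int)) :
    (PySem.Dict.counter m).items.foldl
      (fun d x => d.insert (kf x.1) (d.getD (kf x.1) 0 + x.2)) (PySem.Dict.counter a)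
    = PySem.Dict.counter (a ++ m.map kf) := by
  have hkeys : ((PySem.Dict.counter m).items.foldl
      (fun d x => d.insert (kf x.1) (d.getD (kf x.1) 0 + x.2)) (PySem.Dict.counter a)).keys
      = PySem.Set.ofList (a ++ m.map kf) := by
    rw [PySem.Dict.keys_foldl_insert_key ((PySem.Dict.counter m).items) (fun x => kf x.1)
      (fun d x => d.getD (kf x.1) 0 + x.2) (PySem.Dict.counter a)]
    rw [PySem.Dict.keys_counter, PySem.Dict.items_counter, List.map_map]
    have : ((fun x : (Int × Int) × Int => kf x.1) ∘ fun k => (k, (List.count k m : Int)))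
        = kf := rfl
    rw [this, ← pvOfList_map_inj kf hinj, pvUpdate_ofList, ← PySem.Set.ofList_append]
  have hnd : ((PySem.Dict.counter m).items.foldl
      (fun d x => d.insert (kf x.1) (d.getD (kf x.1) 0 + x.2)) (PySem.Dict.counter a)).keys.Nodup :=
    PySem.Dict.nodup_keys_foldl_insert_key _ _ _ _ (by
      rw [PySem.Dict.keys_counter]; exact PySem.Set.nodup_ofList a)
  apply PySem.Dict.ext
  rw [PySem.Dict.items_eq_map_keys _ hnd 0, hkeys,
    PySem.Dict.items_counter (a ++ m.map kf)]
  apply List.map_congr_left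
  intro k hk
  rw [pvGetD_bumpFold, PySem.Dict.getD_counter, pvSum_filter_count kf hinj]
  rw [List.count_append]
  push_cast
  ring_nf

-- recursion spec for pvSolve
lemma pvCounter_singleton (d : Int × Int) :
    PySem.Dict.counter [d] = PySem.Dict.empty.insert d 1 := by
  have h : PySem.Dict.counter [d]
      = PySem.Dict.empty.insert d (PySem.Dict.empty.getD d 0 + 1) := rfl
  rw [h, PySem.Dict.getD_empty]
  norm_num

lemma pvSolve_spec_aux : ∀ (n : Nat) (cs : List Char), cs.length = n → pvValid cs = true →
    pvSolve cs = (PySem.Dict.counter (pvAbs cs 0 0), pvEnd cs) := by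
  intro n
  induction n using Nat.strong_induction_on with
  | _ n ih =>
    intro cs hlen h
    match cs with
    | [] => simp only [pvSolve]; rfl
    | [c] =>
      simp only [pvValid, List.all_cons, List.all_nil, Bool.and_true] at h
      obtain ⟨d, hd⟩ := pvDelta_isSome h
      simp only [pvSolve, hd, pvAbs, pvEnd, zero_add]
      rw [pvCounter_singleton]
    | c1 :: c2 :: rest =>
      have hn2 : 2 ≤ (c1 :: c2 :: rest).length := by simp
      have hvl : pvValid ((c1 :: c2 :: rest).take ((c1 :: c2 :: rest).length / 2)) = true := by
        simp only [pvValid, List.all_eq_true] at h ⊢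
        exact fun x hx => h x (List.mem_of_mem_take hx)
      have hvr : pvValid ((c1 :: c2 :: rest).drop ((c1 :: c2 :: rest).length / 2)) = true := by
        simp only [pvValid, List.all_eq_true] at h ⊢
        exact fun x hx => h x (List.mem_of_mem_drop hx)
      have hll : ((c1 :: c2 :: rest).take ((c1 :: c2 :: rest).length / 2)).length
          < n := by rw [← hlen]; simp [List.length_take]; omega
      have hlr : ((c1 :: c2 :: rest).drop ((c1 :: c2 :: rest).length / 2)).length
          < n := by rw [← hlen]; simp [List.length_drop]; omega
      rw [pvSolve]
      rw [ih _ hll _ rfl hvl, ih _ hlr _ rfl hvr]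
      have hinj : Function.Injective (fun q : Int × Int =>
          ((pvEnd ((c1 :: c2 :: rest).take ((c1 :: c2 :: rest).length / 2))).1 + q.1,
           (pvEnd ((c1 :: c2 :: rest).take ((c1 :: c2 :: rest).length / 2))).2 + q.2)) := by
        intro x y hxy
        simp only [Prod.mk.injEq] at hxy
        obtain ⟨ha, hb⟩ := hxy
        have h1 : x.1 = y.1 := by omega
        have h2 : x.2 = y.2 := by omega
        exact Prod.ext h1 h2
      rw [pvMerge_counter _ hinj]
      have hsplit : (c1 :: c2 :: rest)
          = (c1 :: c2 :: rest).take ((c1 :: c2 :: rest).length / 2)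
            ++ (c1 :: c2 :: rest).drop ((c1 :: c2 :: rest).length / 2) :=
        (List.take_append_drop _ _).symm
      refine Prod.ext ?_ ?_
      · show _ = PySem.Dict.counter (pvAbs (c1 :: c2 :: rest) 0 0)
        conv_rhs => rw [hsplit]
        rw [pvAbs_append _ _ 0 0 hvl, zero_add, zero_add,
          pvAbs_shift _ (pvEnd ((c1 :: c2 :: rest).take ((c1 :: c2 :: rest).length / 2))).1
            (pvEnd ((c1 :: c2 :: rest).take ((c1 :: c2 :: rest).length / 2))).2 hvr]
      · show _ = pvEnd (c1 :: c2 :: rest)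
        conv_rhs => rw [hsplit]
        rw [pvEnd_append _ _ hvl]

-- A-side: the loop is a fold of bump1 over the absolute path
lemma pvGetCoord_valid (ch : Char) (r c : Int)
    (h : (ch = '>' || ch = '<' || ch = '^' || ch = 'v') = true) :
    ∃ d, pvDelta ch = some d ∧ get_coordinate ch r c = some (r + d.1, c + d.2) := by
  simp only [Bool.or_eq_true, decide_eq_true_eq] at h
  rcases h with ((h | h) | h) | h <;> subst h
  · exact ⟨(0, 1), rfl, by simp [get_coordinate]⟩
  · exact ⟨(0, -1), rfl, by simp [get_coordinate]; ring⟩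
  · exact ⟨(-1, 0), rfl, by simp [get_coordinate]; ring⟩
  · exact ⟨(1, 0), rfl, by simp [get_coordinate]⟩

lemma pvALoop_eq_foldl (cs : List Char) (r c : Int) (d : PySem.Dict (Int × Int) Int)
    (h : pvValid cs = true) :
    pvALoop cs r c d = (pvAbs cs r c).foldl
      (fun d x => d.insert x (d.getD x 0 + 1)) d := by
  induction cs generalizing r c d with
  | nil => rfl
  | cons ch rest ih =>
    simp only [pvValid, List.all_cons, Bool.and_eq_true] at h
    obtain ⟨dd, hdd, hgc⟩ := pvGetCoord_valid ch r c h.1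
    simp only [pvALoop, hgc, pvAbs, hdd, List.foldl_cons]
    have hbr : (if d.contains (r + dd.1, c + dd.2) = false
          then d.insert (r + dd.1, c + dd.2) 1
          else d.insert (r + dd.1, c + dd.2) (d.getD (r + dd.1, c + dd.2) 0 + 1))
        = d.insert (r + dd.1, c + dd.2) (d.getD (r + dd.1, c + dd.2) 0 + 1) := by
      by_cases hc : d.contains (r + dd.1, c + dd.2) = false
      · simp [hc, PySem.Dict.getD_of_not_contains d 0 hc]
      · simp [hc]
    rw [hbr]
    exact ih _ _ _ h.2

lemma pvFoldl_counter (a l : List (Int × Int)) :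
    l.foldl (fun d x => d.insert x (d.getD x 0 + 1)) (PySem.Dict.counter a)
      = PySem.Dict.counter (a ++ l) := by
  unfold PySem.Dict.counter
  rw [List.foldl_append]
  rfl

lemma pvOrigin_dict :
    PySem.Dict.empty.insert ((0 : Int), (0 : Int)) 1
      = PySem.Dict.counter [((0 : Int), (0 : Int))] := by
  rw [pvCounter_singleton]


-- ===== VERDICT =====
theorem deliver_presents_spec : Claim_equal_deliver_presents := by
  intro data _ hpre
  unfold Spec_deliver_presents deliver_presents deliver_presents_alt
  have hv : pvValid data.toList = true := hpre
  have hA : pvALoop data.toList 0 0 (PySem.Dict.empty.insert (0, 0) 1)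
      = PySem.Dict.counter ([((0:Int),(0:Int))] ++ pvAbs data.toList 0 0) := by
    rw [pvALoop_eq_foldl _ _ _ _ hv, pvOrigin_dict, pvFoldl_counter]
  have hB : (pvSolve data.toList).1.items.foldl
      (fun d x => d.insert x.1 (d.getD x.1 0 + x.2))
      (PySem.Dict.empty.insert (0, 0) 1)
      = PySem.Dict.counter ([((0:Int),(0:Int))] ++ pvAbs data.toList 0 0) := by
    rw [pvSolve_spec_aux data.toList.length data.toList rfl hv, pvOrigin_dict]
    have := pvMerge_counter (fun q => q) (fun a b h => h) (pvAbs data.toList 0 0)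
      [((0:Int),(0:Int))]
    simpa using this
  rw [hA]; simp only [hB]
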